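-- pv_equiv track=rewrite | github.com/ugufru/coco | src/spacewarp/sprite_rater.py | sprite_svg
-- ===== SOURCE A (Python) =====
-- def seed_to_dims(seed):
--     w_bits = (seed >> 6) & 3
--     h_bits = (seed >> 4) & 3
--     width = {0: 5, 1: 7, 2: 7, 3: 9}[w_bits]
--     height = 5 if h_bits < 2 else 7
--     return width, height
--
-- def generate_pixels(seed):
--     width, height = seed_to_dims(seed)
--     half_width = (width + 1) // 2
--     state = seed & 0xFF
--     pixels = set()
--     for row in range(height):
--         state = (state * 5 + 3) & 0xFF
--         for col in range(half_width):
--             if (state >> col) & 1: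
--                 pixels.add((col, row))
--                 mirror = width - 1 - col
--                 if mirror != col:
--                     pixels.add((mirror, row))
--     pixels.add((half_width - 1, height // 2))
--     return width, height, pixels
--
-- def sprite_svg(seed, color="#ffffff", px=1):
--     w, h, pixels = generate_pixels(seed)
--     rects = ''.join(
--         f'<rect x="{c*px}" y="{r*px}" width="{px}" height="{px}" fill="{color}"/>'
--         for c, r in sorted(pixels))
--     return (f'<svg xmlns="http://www.w3.org/2000/svg" width="{w*px}" height="{h*px}" '
--             f'viewBox="0 0 {w*px} {h*px}" style="image-rendering:pixelated">'
--             f'{rects}</svg>')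
-- ===== SOURCE B (Python) =====
-- def sprite_svg(seed, color="#ffffff", px=1):
--     # grid-based rewrite: precompute per-row LCG states, build a full-width 2D
--     # boolean grid via mirrored bit index min(c, width-1-c), force the center
--     # cell, then emit rects in a column-major scan (matches sorted coordinates).
--     width = (5, 7, 7, 9)[(seed >> 6) & 3]
--     height = 5 if ((seed >> 4) & 3) < 2 else 7
--     half_width = (width + 1) // 2
--     states = []
--     state = seed & 0xFF
--     for _ in range(height):
--         state = (state * 5 + 3) & 0xFF
--         states.append(state)
--     grid = [[(states[r] >> min(c, width - 1 - c)) & 1 == 1 for c in range(width)]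
--             for r in range(height)]
--     grid[height // 2][half_width - 1] = True
--     coords = [(c, r) for c in range(width) for r in range(height) if grid[r][c]]
--     rects = ''.join(
--         f'<rect x="{c*px}" y="{r*px}" width="{px}" height="{px}" fill="{color}"/>'
--         for c, r in coords)
--     return (f'<svg xmlns="http://www.w3.org/2000/svg" width="{width*px}" height="{height*px}" '
--             f'viewBox="0 0 {width*px} {height*px}" style="image-rendering:pixelated">'
--             f'{rects}</svg>')
-- ===== Notes on version B (the rewrite author's own statement) =====
-- stated objective: alternative
-- what changed: Replaces A's mirrored set-of-coordinates plus sort with a precomputed per-row LCG state list, a full-width boolean grid (bit index min(c, width-1-c)) with the center cell forced, and a column-major grid scan that emits rects already in sorted order.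
import Mathlib
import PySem

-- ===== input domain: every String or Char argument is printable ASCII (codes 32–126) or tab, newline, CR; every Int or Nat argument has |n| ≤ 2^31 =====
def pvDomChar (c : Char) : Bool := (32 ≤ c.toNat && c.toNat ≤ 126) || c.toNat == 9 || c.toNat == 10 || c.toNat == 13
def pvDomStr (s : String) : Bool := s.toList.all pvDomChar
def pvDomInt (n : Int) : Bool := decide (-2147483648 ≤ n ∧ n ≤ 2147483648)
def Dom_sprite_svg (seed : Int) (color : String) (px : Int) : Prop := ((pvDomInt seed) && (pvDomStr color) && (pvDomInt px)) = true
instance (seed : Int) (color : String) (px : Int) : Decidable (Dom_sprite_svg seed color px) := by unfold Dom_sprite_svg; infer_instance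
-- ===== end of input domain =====

-- B replaces A's mirrored set-of-coordinates + sort with a precomputed state list, a
-- full-width boolean grid and a column-major scan (objective: alternative/simpler emission).

-- shared formatting helpers (identical f-strings in both Pythons)
def fmtRect (color : String) (px c r : Int) : String :=
  "<rect x=\"" ++ PySem.Int.toStr (c * px) ++ "\" y=\"" ++ PySem.Int.toStr (r * px) ++
  "\" width=\"" ++ PySem.Int.toStr px ++ "\" height=\"" ++ PySem.Int.toStr px ++
  "\" fill=\"" ++ color ++ "\"/>"

def svgWrap (w h : Int) (px : Int) (rects : String) : String :=
  "<svg xmlns=\"http://www.w3.org/2000/svg\" width=\"" ++ PySem.Int.toStr (w * px) ++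
  "\" height=\"" ++ PySem.Int.toStr (h * px) ++ "\" viewBox=\"0 0 " ++ PySem.Int.toStr (w * px) ++
  " " ++ PySem.Int.toStr (h * px) ++ "\" style=\"image-rendering:pixelated\">" ++ rects ++ "</svg>"

-- ===== PORT A =====
-- {0:5,1:7,2:7,3:9}[w_bits]: w_bits = x & 3 is always a key, so the Python lookup never
-- raises; ported with getD (the default 0 is unreachable).
def seed_to_dims (seed : Int) : Int × Int :=
  let w_bits := PySem.Int.band (seed >>> (6 : Nat)) 3
  let h_bits := PySem.Int.band (seed >>> (4 : Nat)) 3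
  let width := ((((PySem.Dict.empty.insert (0 : Int) (5 : Int)).insert 1 7).insert 2 7).insert 3 9).getD w_bits 0
  let height := if h_bits < 2 then (5 : Int) else 7
  (width, height)

def generate_pixels (seed : Int) : Int × Int × List (Int × Int) :=
  let wh := seed_to_dims seed
  let width := wh.1
  let height := wh.2
  let half_width := PySem.Int.floordiv (width + 1) 2
  let init : Int × PySem.Set (Int × Int) := (PySem.Int.band seed 255, PySem.Set.empty)
  let fin := (PySem.List.pyRange 0 height 1).foldl
    (fun (st : Int × PySem.Set (Int × Int)) row =>
      let state := PySem.Int.band (st.1 * 5 + 3) 255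
      let pixels := (PySem.List.pyRange 0 half_width 1).foldl
        (fun (pxs : PySem.Set (Int × Int)) col =>
          -- col ≥ 0 inside range(half_width), so 'state >> col' is state >>> col.toNat
          if PySem.Int.band (state >>> col.toNat) 1 = 1 then
            let pxs := PySem.Set.add pxs (col, row)
            let mirror := width - 1 - col
            if mirror ≠ col then PySem.Set.add pxs (mirror, row) else pxs
          else pxs) st.2
      (state, pixels)) init
  let pixels := PySem.Set.add fin.2 (half_width - 1, PySem.Int.floordiv height 2)
  (width, height, pixels)

def sprite_svg (seed : Int) (color : String) (px : Int) : String :=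
  let whp := generate_pixels seed
  let rects := PySem.Str.join ""
    ((PySem.List.sorted2 whp.2.2 Prod.fst Prod.snd).map (fun cr => fmtRect color px cr.1 cr.2))
  svgWrap whp.1 whp.2.1 px rects

-- ===== PORT B =====
-- (width, height, column-major coordinate list) of Source B's grid construction
def altCore (seed : Int) : Int × Int × List (Int × Int) :=
  let width : Int := PySem.List.pyGetD [5, 7, 7, 9] (PySem.Int.band (seed >>> (6 : Nat)) 3) 0
  let height : Int := if PySem.Int.band (seed >>> (4 : Nat)) 3 < 2 then 5 else 7
  let half_width := PySem.Int.floordiv (width + 1) 2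
  let states := ((PySem.List.pyRange 0 height 1).foldl
    (fun (st : Int × List Int) _ =>
      let state := PySem.Int.band (st.1 * 5 + 3) 255
      (state, st.2 ++ [state])) (PySem.Int.band seed 255, [])).2
  let grid := (PySem.List.pyRange 0 height 1).map (fun r =>
    (PySem.List.pyRange 0 width 1).map (fun c =>
      -- 0 ≤ min c (width-1-c) for c in range(width), so '>>' is >>> toNat
      PySem.Int.band (PySem.List.pyGetD states r 0 >>> (min c (width - 1 - c)).toNat) 1 == 1))
  let ctr := PySem.Int.floordiv height 2
  let grid := PySem.List.pySetD grid ctr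
      (PySem.List.pySetD (PySem.List.pyGetD grid ctr []) (half_width - 1) true)
  let coords := (PySem.List.pyRange 0 width 1).flatMap (fun c =>
    (PySem.List.pyRange 0 height 1).flatMap (fun r =>
      if PySem.List.pyGetD (PySem.List.pyGetD grid r []) c false then [(c, r)] else []))
  (width, height, coords)

def sprite_svg_alt (seed : Int) (color : String) (px : Int) : String :=
  let whc := altCore seed
  let rects := PySem.Str.join "" (whc.2.2.map (fun cr => fmtRect color px cr.1 cr.2))
  svgWrap whc.1 whc.2.1 px rects

-- ===== PRECONDITION & SPEC =====
def Spec_sprite_svg (seed : Int) (color : String) (px : Int) (out : String) : Prop := out = sprite_svg_alt seed color px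
instance (seed : Int) (color : String) (px : Int) (out : String) : Decidable (Spec_sprite_svg seed color px out) := by unfold Spec_sprite_svg; infer_instance

-- ===== CLAIM (what is proved, stated in full; the proofs are below) =====
def Claim_equal_sprite_svg : Prop := ∀ (seed : Int) (color : String) (px : Int), Dom_sprite_svg seed color px → Spec_sprite_svg seed color px (sprite_svg seed color px)

-- ===== LEMMAS AND PROOFS =====

-- Python bitwise ops as arithmetic on Int
theorem pv_band255 (s : Int) : PySem.Int.band s 255 = s % 256 := by
  unfold PySem.Int.band
  split_ifs with h1 h2 h2 <;> try omega
  · have h := Nat.and_two_pow_sub_one_eq_mod s.toNat 8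
    norm_num at h
    simp only [show ((255 : Int)).toNat = 255 from rfl]
    omega
  · have hs : (((-s - 1).toNat : Int)) = -s - 1 := by omega
    simp only [show ((255 : Int)).toNat = 255 from rfl]
    generalize hg : (-s - 1).toNat = n at hs ⊢
    have h := Nat.and_two_pow_sub_one_eq_mod n 8
    have hc : (255 : Nat) &&& n = n &&& 255 := Nat.and_comm _ _
    norm_num at h
    omega

theorem pv_band3 (s : Int) : PySem.Int.band s 3 = s % 4 := by
  unfold PySem.Int.band
  split_ifs with h1 h2 h2 <;> try omega
  · have h := Nat.and_two_pow_sub_one_eq_mod s.toNat 2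
    norm_num at h
    simp only [show ((3 : Int)).toNat = 3 from rfl]
    omega
  · have hs : (((-s - 1).toNat : Int)) = -s - 1 := by omega
    simp only [show ((3 : Int)).toNat = 3 from rfl]
    generalize hg : (-s - 1).toNat = n at hs ⊢
    have h := Nat.and_two_pow_sub_one_eq_mod n 2
    have hc : (3 : Nat) &&& n = n &&& 3 := Nat.and_comm _ _
    norm_num at h
    omega

theorem pv_shr6 (s : Int) : s >>> (6 : Nat) = s / 64 := by
  have h := Int.shiftRight_eq_div_pow s 6; simpa using h

theorem pv_shr4 (s : Int) : s >>> (4 : Nat) = s / 16 := by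
  have h := Int.shiftRight_eq_div_pow s 4; simpa using h

-- the three seed-consuming expressions depend only on seed mod 256
theorem pv_e6 (s : Int) :
    PySem.Int.band (s >>> (6 : Nat)) 3 = PySem.Int.band ((s % 256) >>> (6 : Nat)) 3 := by
  rw [pv_band3, pv_band3, pv_shr6, pv_shr6]; omega

theorem pv_e4 (s : Int) :
    PySem.Int.band (s >>> (4 : Nat)) 3 = PySem.Int.band ((s % 256) >>> (4 : Nat)) 3 := by
  rw [pv_band3, pv_band3, pv_shr4, pv_shr4]; omega

theorem pv_e0 (s : Int) : PySem.Int.band s 255 = PySem.Int.band (s % 256) 255 := by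
  rw [pv_band255, pv_band255]; omega

theorem generate_pixels_mod (s : Int) : generate_pixels s = generate_pixels (s % 256) := by
  unfold generate_pixels seed_to_dims
  rw [pv_e6, pv_e4, pv_e0]

theorem altCore_mod (s : Int) : altCore s = altCore (s % 256) := by
  unfold altCore
  rw [pv_e6, pv_e4, pv_e0]

-- A's (width, height, sorted pixel list) triple
def coreA (s : Int) : Int × Int × List (Int × Int) :=
  ((generate_pixels s).1, (generate_pixels s).2.1,
    PySem.List.sorted2 (generate_pixels s).2.2 Prod.fst Prod.snd)

set_option maxHeartbeats 4000000 in
set_option maxRecDepth 100000 in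
theorem core_eq_small : ∀ n ∈ List.range 256, coreA (n : Int) = altCore (n : Int) := by decide

theorem core_eq (s : Int) : coreA s = altCore s := by
  have h0 : (0 : Int) ≤ s % 256 := Int.emod_nonneg s (by norm_num)
  have h1 : s % 256 < 256 := Int.emod_lt_of_pos s (by norm_num)
  have hn : s % 256 = ((s % 256).toNat : Int) := by omega
  have hlt : (s % 256).toNat < 256 := by omega
  have hmem : (s % 256).toNat ∈ List.range 256 := List.mem_range.mpr hlt
  have hsm := core_eq_small _ hmem
  calc coreA s = coreA (s % 256) := by unfold coreA; rw [generate_pixels_mod]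
    _ = altCore (s % 256) := by rw [hn]; exact hsm
    _ = altCore s := (altCore_mod s).symm

-- ===== VERDICT (by name: the statement is the Claim_ definition above) =====
theorem sprite_svg_spec : Claim_equal_sprite_svg := by
  intro seed color px _
  unfold Spec_sprite_svg sprite_svg sprite_svg_alt
  have h := core_eq seed
  unfold coreA at h
  have h1 : (generate_pixels seed).1 = (altCore seed).1 := congrArg (fun t => t.1) h
  have h2 : (generate_pixels seed).2.1 = (altCore seed).2.1 := congrArg (fun t => t.2.1) h
  have h3 : PySem.List.sorted2 (generate_pixels seed).2.2 Prod.fst Prod.snd = (altCore seed).2.2 :=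
    congrArg (fun t => t.2.2) h
  simp only [h1, h2, h3]
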